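-- pv_equiv track=rewrite | github.com/Meshrrr/tochkatestautumn | run2.py | select_edge_to_cut
-- ===== SOURCE A (Python) =====
-- def select_edge_to_cut(graph, threatened_gateways, virus_position):
--     candidate_edges = []
--
--     for gateway in threatened_gateways:
--         for node in sorted(graph[gateway]):
--             candidate = f"{gateway}-{node}"
--             candidate_edges.append(candidate)
--
--     for candidate in candidate_edges:
--         gate, node = candidate.split('-')
--         if node == virus_position:
--             return candidate
--
--     return min(candidate_edges)
-- ===== SOURCE B (Python) =====
-- def select_edge_to_cut(graph, threatened_gateways, virus_position):
--     """Pick the edge 'gateway-node' to cut: the first candidate whose far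
--     endpoint is the virus position, else the lexicographically smallest one."""
--     best = None
--     for gateway in threatened_gateways:
--         for node in sorted(graph[gateway]):
--             edge = f"{gateway}-{node}"
--             _, endpoint = edge.split('-')
--             if endpoint == virus_position:
--                 return edge
--             if best is None or edge < best:
--                 best = edge
--     return best
-- ===== Notes on version B (the rewrite author's own statement) =====
-- stated objective: alternative
-- what changed: Fuses A's three phases (build the full candidate list, rescan it for a virus match, then min() over the whole list) into one generate-and-test pass that keeps only a running lexicographic minimum; Pre_ excludes exactly the inputs where A raises (missing gateway key, a name containing '-' reached before any match, or no candidate edges at all).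
import Mathlib
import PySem

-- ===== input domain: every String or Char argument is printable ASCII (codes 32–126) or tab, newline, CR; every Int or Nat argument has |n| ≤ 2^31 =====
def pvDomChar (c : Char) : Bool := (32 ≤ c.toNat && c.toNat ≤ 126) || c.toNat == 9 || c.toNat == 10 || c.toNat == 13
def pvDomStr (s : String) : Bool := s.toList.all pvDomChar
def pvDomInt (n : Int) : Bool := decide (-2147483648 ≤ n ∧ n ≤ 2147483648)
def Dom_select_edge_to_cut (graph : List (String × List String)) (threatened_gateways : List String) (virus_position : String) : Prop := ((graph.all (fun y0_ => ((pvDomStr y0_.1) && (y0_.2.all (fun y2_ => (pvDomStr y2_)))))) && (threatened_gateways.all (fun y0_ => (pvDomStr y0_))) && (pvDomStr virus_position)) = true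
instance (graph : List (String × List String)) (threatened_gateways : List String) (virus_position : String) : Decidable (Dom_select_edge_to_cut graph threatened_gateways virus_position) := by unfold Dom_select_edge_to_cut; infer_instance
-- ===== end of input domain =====

-- B fuses A's three phases (build all candidates, rescan for a virus match, min() of all)
-- into one generate-and-test pass keeping a running lexicographic minimum (objective: alternative).

-- ===== PORT A =====
-- f"{gateway}-{node}"
def pvFmt (g n : String) : String := g ++ "-" ++ n

-- the second 'for candidate in candidate_edges' loop with its early return:
-- gate, node = candidate.split('-'); if node == virus_position: return candidate
-- (Pre_ guarantees the split yields exactly two pieces, so index 1 is the node)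
def pvScanA (vp : String) : List String → Option String
  | [] => none
  | c :: rest =>
    if ((PySem.Str.split? c "-").getD []).getD 1 "" == vp then some c else pvScanA vp rest

def select_edge_to_cut (graph : List (String × List String)) (threatened_gateways : List String) (virus_position : String) : String :=
  -- first loop: candidate_edges built by appending (graph[gateway] : KeyError excluded by Pre_;
  -- sorted() keyed via .toList: code-point lexicographic, exactly Python's string order)
  let candidate_edges := threatened_gateways.foldl (fun acc g =>
    (PySem.List.sorted ((PySem.Dict.mk graph).getD g []) (fun x => x.toList) false).foldl
      (fun acc2 n => acc2 ++ [pvFmt g n]) acc) []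
  match pvScanA virus_position candidate_edges with
  | some c => c
  | none => (PySem.List.min? candidate_edges (fun s => s.toList)).getD ""  -- min([]) raises: excluded by Pre_

-- ===== PORT B =====
-- 'if best is None or edge < best: best = edge'
-- (str '<' ported via .toList: code-point lexicographic, exactly Python's string order)
def pvUpd (best : Option String) (c : String) : Option String :=
  match best with
  | none => some c
  | some b => if c.toList < b.toList then some c else some b

-- inner 'for node in sorted(graph[gateway])': early return (.inl) or updated best (.inr);
-- '_, endpoint = edge.split('-')' as in port A's scan (ValueError on ≠ 2 pieces: outside Pre_)
def pvInner (vp g : String) : List String → Option String → Sum String (Option String)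
  | [], best => .inr best
  | n :: rest, best =>
    let c := pvFmt g n
    if ((PySem.Str.split? c "-").getD []).getD 1 "" == vp then .inl c
    else pvInner vp g rest (pvUpd best c)

-- outer 'for gateway in threatened_gateways'
def pvOuter (vp : String) (d : PySem.Dict String (List String)) : List String → Option String → Sum String (Option String)
  | [], best => .inr best
  | g :: rest, best =>
    match pvInner vp g (PySem.List.sorted (d.getD g []) (fun x => x.toList) false) best with
    | .inl c => .inl c
    | .inr best' => pvOuter vp d rest best'

def select_edge_to_cut_alt (graph : List (String × List String)) (threatened_gateways : List String) (virus_position : String) : String :=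
  match pvOuter virus_position (PySem.Dict.mk graph) threatened_gateways none with
  | .inl c => c
  | .inr (some b) => b
  | .inr none => ""  -- Python B returns None here (no candidates): excluded by Pre_ (A raises there)

-- ===== PRECONDITION & SPEC =====
-- a (gateway, node) pair whose names contain no dash: its candidate splits back into exactly two pieces
def pvDashFree (p : String × String) : Bool :=
  !(p.1.toList.contains '-') && !(p.2.toList.contains '-')

-- Pre_ is exactly where the Python A returns: every threatened gateway is a graph key (else
-- KeyError), and in the candidate scan a virus match is reached before any candidate whose
-- gateway/node name contains a dash (such a candidate makes the 2-way unpack of the split on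
-- dashes raise ValueError), or else all candidates are dash-free and there is at least one
-- (else the min of an empty list raises).
def Pre_select_edge_to_cut (graph : List (String × List String)) (threatened_gateways : List String) (virus_position : String) : Prop :=
  let d := PySem.Dict.mk graph
  let pairs := threatened_gateways.flatMap (fun g =>
    (PySem.List.sorted (d.getD g []) (fun x => x.toList) false).map (fun n => (g, n)))
  let pref := pairs.takeWhile pvDashFree
  (threatened_gateways.all (fun g => d.contains g) = true)
  ∧ pairs ≠ []
  ∧ (pref.any (fun p => p.2 == virus_position) = true ∨ pref = pairs)

instance (graph : List (String × List String)) (threatened_gateways : List String) (virus_position : String) : Decidable (Pre_select_edge_to_cut graph threatened_gateways virus_position) := by unfold Pre_select_edge_to_cut; infer_instance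

def pvWitness_select_edge_to_cut : (List (String × List String)) × List String × String :=
  ([("g", ["a", "z-"])], ["g"], "a")

def Spec_select_edge_to_cut (graph : List (String × List String)) (threatened_gateways : List String) (virus_position : String) (out : String) : Prop := out = select_edge_to_cut_alt graph threatened_gateways virus_position
instance (graph : List (String × List String)) (threatened_gateways : List String) (virus_position : String) (out : String) : Decidable (Spec_select_edge_to_cut graph threatened_gateways virus_position out) := by unfold Spec_select_edge_to_cut; infer_instance

-- ===== CLAIM (what is proved, stated in full; the proofs are below) =====
def Claim_equal_select_edge_to_cut : Prop := ∀ (graph : List (String × List String)) (threatened_gateways : List String) (virus_position : String), Dom_select_edge_to_cut graph threatened_gateways virus_position → Pre_select_edge_to_cut graph threatened_gateways virus_position → Spec_select_edge_to_cut graph threatened_gateways virus_position (select_edge_to_cut graph threatened_gateways virus_position)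

-- ===== LEMMAS AND PROOFS =====

-- candidates contributed by one gateway
def pvGC (d : PySem.Dict String (List String)) (g : String) : List String :=
  (PySem.List.sorted (d.getD g []) (fun x => x.toList) false).map (pvFmt g)

lemma pvScanA_append (vp : String) (xs ys : List String) :
    pvScanA vp (xs ++ ys) = match pvScanA vp xs with | some c => some c | none => pvScanA vp ys := by
  induction xs with
  | nil => simp [pvScanA]
  | cons c rest ih =>
    simp only [List.cons_append, pvScanA]
    split <;> simp [ih]

lemma pvCandA (d : PySem.Dict String (List String)) (tgs : List String) (acc : List String) :
    tgs.foldl (fun acc g =>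
      (PySem.List.sorted (d.getD g []) (fun x => x.toList) false).foldl
        (fun acc2 n => acc2 ++ [pvFmt g n]) acc) acc = acc ++ tgs.flatMap (pvGC d) := by
  induction tgs generalizing acc with
  | nil => simp
  | cons g rest ih =>
    rw [List.foldl_cons, PySem.List.foldl_append_singleton_eq_map, ih, List.flatMap_cons,
      List.append_assoc]
    simp [pvGC]

lemma pvInner_spec (vp g : String) (ns : List String) (best : Option String) :
    pvInner vp g ns best =
      match pvScanA vp (ns.map (pvFmt g)) with
      | some c => .inl c
      | none => .inr ((ns.map (pvFmt g)).foldl pvUpd best) := by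
  induction ns generalizing best with
  | nil => simp [pvInner, pvScanA]
  | cons n rest ih =>
    simp only [pvInner, List.map_cons, pvScanA, List.foldl_cons]
    split <;> simp [ih]

lemma pvOuter_spec (vp : String) (d : PySem.Dict String (List String)) (tgs : List String) (best : Option String) :
    pvOuter vp d tgs best =
      match pvScanA vp (tgs.flatMap (pvGC d)) with
      | some c => .inl c
      | none => .inr ((tgs.flatMap (pvGC d)).foldl pvUpd best) := by
  induction tgs generalizing best with
  | nil => simp [pvOuter, pvScanA]
  | cons g rest ih =>
    simp only [pvOuter, pvInner_spec, List.flatMap_cons, pvScanA_append, List.foldl_append]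
    rw [show ((PySem.List.sorted (d.getD g []) (fun x => x.toList) false).map (pvFmt g)) = pvGC d g from rfl]
    cases h : pvScanA vp (pvGC d g) <;> simp [ih]

-- min(candidate_edges) IS the running-best fold of B: min? is that very foldl, definitionally
lemma pvMinEq (cs : List String) :
    (PySem.List.min? cs (fun s => s.toList)).getD "" =
      (match cs.foldl pvUpd (none : Option String) with | some b => b | none => "") := by
  suffices h : PySem.List.min? cs (fun s : String => s.toList) = cs.foldl pvUpd none by
    rw [h]
    cases cs.foldl pvUpd (none : Option String) <;> rfl
  simp only [PySem.List.min?]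
  exact PySem.List.foldl_congr_mem cs _ pvUpd none (fun acc x _ => by cases acc <;> rfl)

-- ===== VERDICT (by name: the statement is the Claim_ definition above) =====
theorem select_edge_to_cut_spec : Claim_equal_select_edge_to_cut := by
  intro graph tgs vp _ _
  unfold Spec_select_edge_to_cut select_edge_to_cut select_edge_to_cut_alt
  rw [pvCandA, pvOuter_spec]
  simp only [List.nil_append]
  cases h : pvScanA vp ((tgs.flatMap (pvGC (PySem.Dict.mk graph)))) with
  | some c => simp
  | none =>
    rw [pvMinEq]
    cases List.foldl pvUpd none (tgs.flatMap (pvGC (PySem.Dict.mk graph))) <;> rfl
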